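-- pv_equiv track=rewrite | github.com/Ishan12z1/RAG-project | rag/retrieval/bm25_index.py | _contains_phrase
-- ===== SOURCE A (Python) =====
-- from typing import Dict, Iterable, List, Tuple, Optional
--
-- def _contains_phrase(doc_tokens: List[str], phrase_tokens: List[str]) -> bool:
--     if not phrase_tokens or len(phrase_tokens) > len(doc_tokens):
--         return False
--
--     m = len(phrase_tokens)
--     for i in range(len(doc_tokens) - m + 1):
--         if doc_tokens[i:i + m] == phrase_tokens:
--             return True
--     return False
-- ===== SOURCE B (Python) =====
-- def _contains_phrase(doc_tokens, phrase_tokens):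
--     # Positional inverted index (as in IR phrase queries): one pass builds
--     # token -> positions; the phrase is then matched by intersecting shifted
--     # posting lists, so no window slice is ever built or compared.
--     if not phrase_tokens:
--         return False
--     index = {}
--     for i, tok in enumerate(doc_tokens):
--         index.setdefault(tok, []).append(i)
--     starts = index.get(phrase_tokens[0], [])
--     for off, tok in enumerate(phrase_tokens[1:], start=1):
--         if not starts:
--             break
--         postings = set(index.get(tok, []))
--         starts = [i for i in starts if i + off in postings]
--     return bool(starts)
-- ===== Notes on version B (the rewrite author's own statement) =====
-- stated objective: alternative
-- what changed: B replaces A's sliding-window loop that slice-compares the whole phrase at every start position with a positional inverted index (token -> positions, built in one pass) whose shifted posting lists are intersected per phrase token, so no window slice is ever built or compared; it trades an always-paid O(n) index build for cheap intersections when the phrase's tokens are rare or absent.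
import Mathlib
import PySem

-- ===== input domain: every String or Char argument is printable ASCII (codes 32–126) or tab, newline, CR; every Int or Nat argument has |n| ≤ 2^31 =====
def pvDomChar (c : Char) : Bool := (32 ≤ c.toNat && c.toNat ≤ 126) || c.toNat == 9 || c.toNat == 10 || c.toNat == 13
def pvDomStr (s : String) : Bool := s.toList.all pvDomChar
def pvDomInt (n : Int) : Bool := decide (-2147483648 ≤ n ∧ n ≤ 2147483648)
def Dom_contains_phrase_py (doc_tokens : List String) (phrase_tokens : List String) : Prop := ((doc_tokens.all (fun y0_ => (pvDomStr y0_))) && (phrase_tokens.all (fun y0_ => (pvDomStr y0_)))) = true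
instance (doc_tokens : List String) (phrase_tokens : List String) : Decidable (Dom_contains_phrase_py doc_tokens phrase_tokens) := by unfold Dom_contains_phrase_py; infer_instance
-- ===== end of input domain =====

-- B builds a positional inverted index (token -> list of positions) in one pass and
-- matches the phrase by intersecting shifted posting lists, instead of slice-comparing
-- the whole phrase at every window start (objective: alternative algorithm).

-- ===== PORT A =====
def contains_phrase_py (doc_tokens : List String) (phrase_tokens : List String) : Bool :=
  if phrase_tokens = [] ∨ (doc_tokens.length : Int) < (phrase_tokens.length : Int) then false
  else
    let m : Int := (phrase_tokens.length : Int)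
    (PySem.List.pyRange 0 ((doc_tokens.length : Int) - m + 1) 1).any
      (fun i => PySem.List.slice doc_tokens (some i) (some (i + m)) == phrase_tokens)

-- ===== PORT B =====
-- `index.setdefault(tok, []).append(i)` is `d[tok] = d.get(tok, []) + [i]`, i.e. Dict.modify;
-- `bool(starts)` on the final posting list is `!starts.isEmpty`; Python's `break` when
-- `starts` is empty is the fold leaving an empty `starts` unchanged (the remaining
-- iterations are skipped, which is exact: they could only keep it empty).
def contains_phrase_py_alt (doc_tokens : List String) (phrase_tokens : List String) : Bool :=
  match phrase_tokens with
  | [] => false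
  | first :: rest =>
    let index : PySem.Dict String (List Int) :=
      (PySem.List.enumerate doc_tokens 0).foldl
        (fun d it => d.modify it.2 [] (· ++ [it.1])) PySem.Dict.empty
    let starts0 : List Int := index.getD first []
    let starts : List Int :=
      (PySem.List.enumerate rest 1).foldl
        (fun s it =>
          if s.isEmpty then s
          else
            let postings := PySem.Set.ofList (index.getD it.2 [])
            s.filter (fun i => PySem.Set.contains postings (i + it.1)))
        starts0
    !starts.isEmpty

-- ===== PRECONDITION & SPEC =====
def Spec_contains_phrase_py (doc_tokens : List String) (phrase_tokens : List String) (out : Bool) : Prop := out = contains_phrase_py_alt doc_tokens phrase_tokens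
instance (doc_tokens : List String) (phrase_tokens : List String) (out : Bool) : Decidable (Spec_contains_phrase_py doc_tokens phrase_tokens out) := by unfold Spec_contains_phrase_py; infer_instance

-- ===== CLAIM (what is proved, stated in full; the proofs are below) =====
def Claim_equal_contains_phrase_py : Prop := ∀ (doc_tokens : List String) (phrase_tokens : List String), Dom_contains_phrase_py doc_tokens phrase_tokens → Spec_contains_phrase_py doc_tokens phrase_tokens (contains_phrase_py doc_tokens phrase_tokens)

-- ===== LEMMAS AND PROOFS =====

-- the common characterisation both programs compute: the phrase occurs at some start j
def PvHit (doc : List String) (first : String) (rest : List String) : Prop :=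
  ∃ j : Nat, j + rest.length + 1 ≤ doc.length ∧
    (doc.drop j).take (rest.length + 1) = first :: rest

theorem pv_A_iff (doc : List String) (first : String) (rest : List String) :
    contains_phrase_py doc (first :: rest) = true ↔ PvHit doc first rest := by
  unfold contains_phrase_py PvHit
  simp only [List.length_cons]
  by_cases hmn : doc.length < rest.length + 1
  · rw [if_pos (Or.inr (by exact_mod_cast hmn))]
    simp only [Bool.false_eq_true, false_iff, not_exists]
    rintro j ⟨hj, _⟩
    omega
  · rw [if_neg (by
      rintro (h | h)
      · exact (List.cons_ne_nil _ _) h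
      · exact hmn (by exact_mod_cast h))]
    have hlen : (doc.length : Int) - ((rest.length + 1 : Nat) : Int) + 1
        = ((doc.length - rest.length : Nat) : Int) := by omega
    simp only [List.any_eq_true]
    constructor
    · rintro ⟨i, hi, hp⟩
      rw [PySem.List.mem_pyRange_one] at hi
      obtain ⟨hi0, hi1⟩ := hi
      obtain ⟨j, rfl⟩ := Int.eq_ofNat_of_zero_le hi0
      rw [show ((j : Int) + ((rest.length + 1 : Nat) : Int)) = ((j + (rest.length + 1) : Nat) : Int) by push_cast; ring,
        PySem.List.slice_natCast] at hp
      rw [hlen] at hi1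
      refine ⟨j, by omega, ?_⟩
      simp only [beq_iff_eq] at hp
      simpa [Nat.add_sub_cancel_left] using hp
    · rintro ⟨j, hj, hp⟩
      refine ⟨(j : Int), ?_, ?_⟩
      · rw [PySem.List.mem_pyRange_one, hlen]
        exact ⟨Int.natCast_nonneg j, by omega⟩
      · rw [show ((j : Int) + ((rest.length + 1 : Nat) : Int)) = ((j + (rest.length + 1) : Nat) : Int) by push_cast; ring,
          PySem.List.slice_natCast]
        simp only [beq_iff_eq]
        simpa [Nat.add_sub_cancel_left] using hp

-- the pointwise form of PvHit that B's posting-list intersection verifies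
def PvHitP (doc : List String) (first : String) (rest : List String) : Prop :=
  ∃ j : Nat, j + rest.length + 1 ≤ doc.length ∧ doc[j]? = some first ∧
    ∀ k : Nat, k < rest.length → doc[j + 1 + k]? = rest[k]?

theorem pv_hit_iff_pointwise (doc : List String) (first : String) (rest : List String) :
    PvHit doc first rest ↔ PvHitP doc first rest := by
  unfold PvHit PvHitP
  constructor
  · rintro ⟨j, hj, hp⟩
    refine ⟨j, hj, ?_, ?_⟩
    · have := congrArg (fun l => l[0]?) hp
      simpa [List.getElem?_take, List.getElem?_drop] using this
    · intro k hk
      have := congrArg (fun l => l[k + 1]?) hp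
      simp only [List.getElem?_take, List.getElem?_drop] at this
      rw [if_pos (by omega)] at this
      rw [show j + (k + 1) = j + 1 + k by omega] at this
      simpa using this
  · rintro ⟨j, hj, h0, hk⟩
    refine ⟨j, hj, ?_⟩
    apply List.ext_getElem?
    intro i
    rcases Nat.lt_or_ge i (rest.length + 1) with hi | hi
    · rw [List.getElem?_take_of_lt hi, List.getElem?_drop]
      cases i with
      | zero => simpa using h0
      | succ k =>
        rw [show j + (k + 1) = j + 1 + k by omega]
        rw [hk k (by omega)]
        simp
    · rw [List.getElem?_take_eq_none hi, List.getElem?_eq_none (by simpa using hi)]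

-- B's index: positions stored for a token are exactly its occurrence indices
theorem pv_mem_index (doc : List String) (tok : String) (i : Int) :
    i ∈ ((PySem.List.enumerate doc 0).foldl
        (fun d it => d.modify it.2 [] (· ++ [it.1])) PySem.Dict.empty).getD tok []
      ↔ ∃ j : Nat, j < doc.length ∧ i = (j : Int) ∧ doc[j]? = some tok := by
  have hswap : (PySem.List.enumerate doc 0).foldl
      (fun d it => d.modify it.2 [] (· ++ [it.1])) (PySem.Dict.empty : PySem.Dict String (List Int))
      = ((PySem.List.enumerate doc 0).map Prod.swap).foldl
        (fun d p => d.modify p.1 [] (· ++ [p.2])) PySem.Dict.empty := by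
    rw [List.foldl_map]
    rfl
  rw [hswap, PySem.Dict.getD_foldl_modify_append]
  rw [PySem.Dict.getD_empty, List.nil_append, List.filter_map, List.map_map]
  simp only [Function.comp_def, Prod.fst_swap, Prod.snd_swap, List.mem_map, List.mem_filter,
    PySem.List.mem_enumerate_iff, beq_iff_eq]
  constructor
  · rintro ⟨it, ⟨⟨k, hk, rfl⟩, htok⟩, hval⟩
    have hv' : (0 : Int) + k = i := hval
    have ht' : doc[k] = tok := htok
    refine ⟨k, hk, by omega, ?_⟩
    rw [List.getElem?_eq_getElem hk]
    exact congrArg some ht'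
  · rintro ⟨j, hj, rfl, hv⟩
    rw [List.getElem?_eq_getElem hj, Option.some.injEq] at hv
    exact ⟨((0 : Int) + j, doc[j]), ⟨⟨j, hj, rfl⟩, hv⟩, show (0 : Int) + j = j by omega⟩

-- a fold of filters keeps exactly the elements passing every stage
theorem pv_mem_foldl_filter {α β : Type} (L : List β) (p : β → α → Bool) (s0 : List α) (x : α) :
    x ∈ L.foldl (fun s b => s.filter (fun a => p b a)) s0 ↔ x ∈ s0 ∧ ∀ b ∈ L, p b x = true := by
  induction L generalizing s0 with
  | nil => simp
  | cons b L ih =>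
    rw [List.foldl_cons, ih]
    simp only [List.mem_filter, List.mem_cons]
    constructor
    · rintro ⟨⟨hx, hb⟩, hall⟩
      refine ⟨hx, fun c hc => ?_⟩
      rcases hc with rfl | hc
      · exact hb
      · exact hall c hc
    · rintro ⟨hx, hall⟩
      exact ⟨⟨hx, hall b (Or.inl rfl)⟩, fun c hc => hall c (Or.inr hc)⟩

-- the break-on-empty guard is invisible: an empty list filters to itself
theorem pv_foldl_filter_guard {α β : Type} (L : List β) (p : β → α → Bool) (s0 : List α) :
    L.foldl (fun s b => if s.isEmpty then s else s.filter (fun a => p b a)) s0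
      = L.foldl (fun s b => s.filter (fun a => p b a)) s0 := by
  have h : (fun (s : List α) (b : β) => if s.isEmpty then s else s.filter (fun a => p b a))
      = fun s b => s.filter (fun a => p b a) := by
    funext s b
    cases s <;> simp
  rw [h]

theorem pv_B_iff (doc : List String) (first : String) (rest : List String) :
    contains_phrase_py_alt doc (first :: rest) = true ↔ PvHitP doc first rest := by
  unfold PvHitP
  simp only [contains_phrase_py_alt, pv_foldl_filter_guard, Bool.not_eq_true',
    List.isEmpty_eq_false_iff_exists_mem]
  constructor
  · rintro ⟨i, hi⟩
    rw [pv_mem_foldl_filter] at hi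
    obtain ⟨hi0, hall⟩ := hi
    rw [pv_mem_index] at hi0
    obtain ⟨j, hj, rfl, hfirst⟩ := hi0
    have hmem : ∀ k : Nat, k < rest.length →
        ∃ j' : Nat, j' < doc.length ∧ ((j : Int) + (1 + k)) = (j' : Int) ∧ doc[j']? = rest[k]? := by
      intro k hk
      have hin : ((1 : Int) + k, rest[k]) ∈ PySem.List.enumerate rest 1 := by
        rw [PySem.List.mem_enumerate_iff]; exact ⟨k, hk, rfl⟩
      have := hall _ hin
      simp only [PySem.Set.contains, List.contains_eq_mem, decide_eq_true_eq,
        PySem.Set.mem_ofList] at this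
      rw [pv_mem_index] at this
      obtain ⟨j', hj', he, hv⟩ := this
      exact ⟨j', hj', he, by rw [hv, List.getElem?_eq_getElem hk]⟩
    have hbound : j + rest.length + 1 ≤ doc.length := by
      cases Nat.eq_zero_or_pos rest.length with
      | inl h0 => omega
      | inr hpos =>
        obtain ⟨j', hj', he, _⟩ := hmem (rest.length - 1) (by omega)
        have : j + 1 + (rest.length - 1) = j' := by omega
        omega
    refine ⟨j, hbound, hfirst, ?_⟩
    intro k hk
    obtain ⟨j', hj', he, hv⟩ := hmem k hk
    have : j + 1 + k = j' := by omega
    rw [this]; exact hv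
  · rintro ⟨j, hj, h0, hk⟩
    refine ⟨(j : Int), ?_⟩
    rw [pv_mem_foldl_filter]
    constructor
    · rw [pv_mem_index]; exact ⟨j, by omega, rfl, h0⟩
    · intro it hit
      rw [PySem.List.mem_enumerate_iff] at hit
      obtain ⟨k, hkl, rfl⟩ := hit
      simp only [PySem.Set.contains, List.contains_eq_mem, decide_eq_true_eq,
        PySem.Set.mem_ofList]
      rw [pv_mem_index]
      refine ⟨j + 1 + k, by omega, by push_cast; ring, ?_⟩
      rw [hk k hkl, List.getElem?_eq_getElem hkl]

-- ===== VERDICT (by name: the statement is the Claim_ definition above) =====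
theorem contains_phrase_py_spec : Claim_equal_contains_phrase_py := by
  intro doc phrase _
  unfold Spec_contains_phrase_py
  cases phrase with
  | nil => simp [contains_phrase_py, contains_phrase_py_alt]
  | cons first rest =>
    rw [Bool.eq_iff_iff, pv_A_iff, pv_B_iff, pv_hit_iff_pointwise]
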